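-- pv_equiv track=rewrite | github.com/sksizer/DomainNameTool | tld_finder/find_tlds.py | find_matching_tlds
-- ===== SOURCE A (Python) =====
-- def find_matching_tlds(words, tlds):
--     matches = {}
--     for word in words:
--         if word not in matches:
--             matches[word] = []
--         domain = None  # Ensure domain is defined before conditional checks
--         for tld in tlds:
--             if word.endswith("." + tld):
--                 domain = f"{word}"
--             elif word.endswith(tld):
--                 domain = f"{word[:-len(tld)]}.{tld}"
--             if domain:
--                 if word in matches:
--                     if domain not in matches[word]:
--                         matches[word].append(domain)
--                 else:
--                     matches[word] = [domain]
--     return matches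
-- ===== SOURCE B (Python) =====
-- def find_matching_tlds(words, tlds):
--     # Index the tlds by their text once; then each word only inspects its own
--     # suffixes (one dict lookup per suffix) instead of scanning every tld.
--     by_tld = {}
--     for i, tld in enumerate(tlds):
--         by_tld.setdefault(tld, []).append(i)
--     result = {}
--     for word in words:
--         if word in result:
--             continue
--         hits = []
--         for k in range(len(word) + 1):
--             hits.extend(by_tld.get(word[k:], []))
--         hits.sort()
--         domains = []
--         for i in hits:
--             tld = tlds[i]
--             if word.endswith("." + tld):
--                 domain = word
--             else:
--                 domain = word[:-len(tld)] + "." + tld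
--             if domain not in domains:
--                 domains.append(domain)
--         result[word] = domains
--     return result
-- ===== Notes on version B (the rewrite author's own statement) =====
-- stated objective: faster
-- what changed: B builds a dict mapping each tld string to its ascending index list once, then for each word looks up only the word's own suffixes (one lookup per suffix) and sorts the hit indices, instead of A's inner scan over all tlds (with its carryover-domain re-appends) for every word.
import Mathlib
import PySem

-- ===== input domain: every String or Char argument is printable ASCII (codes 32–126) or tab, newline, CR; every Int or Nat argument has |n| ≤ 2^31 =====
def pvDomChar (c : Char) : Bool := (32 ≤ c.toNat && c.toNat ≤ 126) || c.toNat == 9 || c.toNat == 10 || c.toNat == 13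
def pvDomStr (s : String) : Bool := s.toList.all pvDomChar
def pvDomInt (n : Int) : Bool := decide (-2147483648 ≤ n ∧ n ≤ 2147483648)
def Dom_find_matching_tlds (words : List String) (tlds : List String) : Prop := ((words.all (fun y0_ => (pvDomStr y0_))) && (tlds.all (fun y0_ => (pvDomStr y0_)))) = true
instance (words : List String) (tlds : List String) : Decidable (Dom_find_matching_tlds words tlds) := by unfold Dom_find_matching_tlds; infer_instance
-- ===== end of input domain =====

-- B replaces A's per-word scan over all tlds by a dict indexing tlds by text,
-- looked up once per suffix of the word (objective: faster on many tlds).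


-- ===== PORT A =====
-- inner loop body: state is (mtchs, domain); `if domain:` is Python truthiness
-- (None and "" are falsy), written as the match + emptiness test below.
def pvAStep (word : String) (st : PySem.Dict String (List String) × Option String)
    (tld : String) : PySem.Dict String (List String) × Option String :=
  let mtchs := st.1
  let domain :=
    if PySem.Str.endswith word ("." ++ tld) then some word
    else if PySem.Str.endswith word tld then
      some (PySem.Str.slice word none (some (-(PySem.Str.len tld))) ++ "." ++ tld)
    else st.2
  match domain with
  | none => (mtchs, none)
  | some d =>
    if d = "" then (mtchs, some d)
    else
      if mtchs.contains word then
        if (mtchs.getD word []).contains d then (mtchs, some d)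
        else (mtchs.insert word (mtchs.getD word [] ++ [d]), some d)
      else (mtchs.insert word [d], some d)

def find_matching_tlds (words : List String) (tlds : List String) : List (String × List String) :=
  (words.foldl (fun (mtchs : PySem.Dict String (List String)) word =>
    let mtchs := if mtchs.contains word then mtchs else mtchs.insert word []
    (tlds.foldl (pvAStep word) (mtchs, none)).1) PySem.Dict.empty).items

-- ===== PORT B =====
-- by_tld.setdefault(tld, []).append(i)  ==  modify tld [] (· ++ [i])
def pvBIndex (tlds : List String) : PySem.Dict String (List Int) :=
  (PySem.List.enumerate tlds 0).foldl
    (fun d p => d.modify p.2 [] (fun l => l ++ [p.1])) PySem.Dict.empty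

-- one word: hits = sorted indices of tlds equal to some suffix; then the domains
def pvBWord (tlds : List String) (by_tld : PySem.Dict String (List Int)) (word : String) :
    List String :=
  let hits := (PySem.List.pyRange 0 (PySem.Str.len word + 1) 1).foldl
    (fun hits k => hits ++ by_tld.getD (PySem.Str.slice word (some k) none) []) []
  let hits := PySem.List.sorted hits (fun i => i) false
  hits.foldl (fun domains i =>
    let tld := PySem.List.pyGetD tlds i ""   -- tlds[i]; i is always a valid index here
    let domain :=
      if PySem.Str.endswith word ("." ++ tld) then word
      else PySem.Str.slice word none (some (-(PySem.Str.len tld))) ++ "." ++ tld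
    if domains.contains domain then domains else domains ++ [domain]) []

def find_matching_tlds_alt (words : List String) (tlds : List String) :
    List (String × List String) :=
  let by_tld := pvBIndex tlds
  (words.foldl (fun (result : PySem.Dict String (List String)) word =>
    if result.contains word then result
    else result.insert word (pvBWord tlds by_tld word)) PySem.Dict.empty).items

-- ===== PRECONDITION & SPEC =====
def Spec_find_matching_tlds (words : List String) (tlds : List String) (out : List (String × List String)) : Prop := out = find_matching_tlds_alt words tlds
instance (words : List String) (tlds : List String) (out : List (String × List String)) : Decidable (Spec_find_matching_tlds words tlds out) := by unfold Spec_find_matching_tlds; infer_instance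

-- ===== CLAIM (what is proved, stated in full; the proofs are below) =====
def Claim_equal_find_matching_tlds : Prop := ∀ (words : List String) (tlds : List String), Dom_find_matching_tlds words tlds → Spec_find_matching_tlds words tlds (find_matching_tlds words tlds)

-- ===== LEMMAS AND PROOFS =====

-- the domain string produced for a matching tld
def pvMd (w t : String) : String :=
  if PySem.Str.endswith w ("." ++ t) then w
  else PySem.Str.slice w none (some (-(PySem.Str.len t))) ++ "." ++ t

-- ordered first-occurrence dedup, appended to an accumulator
def pvDedup (lst : List String) (xs : List String) : List String :=
  xs.foldl (fun l x => if l.contains x then l else l ++ [x]) lst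

-- the per-word value both programs end up storing
def pvF (tlds : List String) (w : String) : List String :=
  pvDedup [] ((tlds.filter (fun t => PySem.Str.endswith w t)).map (pvMd w))

-- rewrite of an items list at one key
def pvUpd (its : List (String × List String)) (w : String) (v : List String) :
    List (String × List String) :=
  its.map (fun p => if p.1 == w then (w, v) else p)

-- ---- small string facts ----
theorem pvMd_ne_empty (w t : String) : pvMd w t ≠ "" := by
  unfold pvMd
  split_ifs with h
  · intro hw
    subst hw
    rw [PySem.Str.endswith_eq, PySem.Chars.endswith_iff] at h
    have := h.length_le
    simp [String.toList_append] at this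
  · intro hw
    have h2 := congrArg String.toList hw
    have : ('.' : Char) ∈ (PySem.Str.slice w none (some (-(PySem.Str.len t))) ++ "." ++ t).toList := by
      simp [String.toList_append]
    rw [h2] at this
    simp at this

theorem pv_ew_dot (w t : String) (h : PySem.Str.endswith w ("." ++ t) = true) :
    PySem.Str.endswith w t = true := by
  rw [PySem.Str.endswith_eq, PySem.Chars.endswith_iff] at h ⊢
  refine List.IsSuffix.trans ?_ h
  rw [String.toList_append]
  exact (List.suffix_append_of_suffix (List.suffix_refl _))

-- ---- pvDedup / pvUpd facts ----
theorem pvDedup_cons (lst : List String) (x : String) (xs : List String) :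
    pvDedup lst (x :: xs) = pvDedup (if lst.contains x then lst else lst ++ [x]) xs := rfl

theorem mem_pvDedup (lst xs : List String) (y : String) :
    y ∈ pvDedup lst xs ↔ y ∈ lst ∨ y ∈ xs := by
  induction xs generalizing lst with
  | nil => simp [pvDedup]
  | cons x xs ih =>
    show y ∈ pvDedup (if lst.contains x then lst else lst ++ [x]) xs ↔ _
    rw [ih]
    by_cases hx : x ∈ lst <;> simp [hx] <;> aesop

theorem pvDedup_eq_self (lst xs : List String) (h : ∀ x ∈ xs, x ∈ lst) :
    pvDedup lst xs = lst := by
  induction xs with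
  | nil => rfl
  | cons x xs ih =>
    show pvDedup (if lst.contains x then lst else lst ++ [x]) xs = lst
    have hx : lst.contains x = true := by
      simpa using h x (by simp)
    rw [if_pos hx]
    exact ih (fun x hx' => h x (by simp [hx']))

theorem pvUpd_pvUpd (its : List (String × List String)) (w : String) (v v' : List String) :
    pvUpd (pvUpd its w v) w v' = pvUpd its w v' := by
  unfold pvUpd
  rw [List.map_map]
  apply List.map_congr_left
  intro p _
  by_cases h : p.1 = w <;> simp [h]

theorem pvUpd_self (d : PySem.Dict String (List String)) (w : String)
    (hnd : d.keys.Nodup) : pvUpd d.items w (d.getD w []) = d.items := by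
  unfold pvUpd
  conv_rhs => rw [← List.map_id d.items]
  apply List.map_congr_left
  intro p hp
  by_cases h : p.1 = w
  · have hmem : (p.1, p.2) ∈ d.items := hp
    have hg := PySem.Dict.getD_of_mem_items d hmem hnd []
    simp [h] at hg ⊢
    rw [hg, ← h]
  · simp [h]

theorem pvUpd_append (a b : List (String × List String)) (w : String) (v : List String) :
    pvUpd (a ++ b) w v = pvUpd a w v ++ pvUpd b w v := List.map_append ..

theorem pvUpd_of_not_mem (its : List (String × List String)) (w : String) (v : List String)
    (h : ∀ p ∈ its, p.1 ≠ w) : pvUpd its w v = its := by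
  unfold pvUpd
  conv_rhs => rw [← List.map_id its]
  apply List.map_congr_left
  intro p hp
  simp [h p hp]

-- ---- A-side: the inner loop over tlds only edits the entry at `word` ----
theorem pvA_inner (w : String) (ts : List String) :
    ∀ (d : PySem.Dict String (List String)) (dom : Option String),
    d.keys.Nodup → d.contains w = true →
    (∀ s, dom = some s → s ≠ "" ∧ s ∈ d.getD w []) →
    ((ts.foldl (pvAStep w) (d, dom)).1).items
      = pvUpd d.items w
          (pvDedup (d.getD w []) ((ts.filter (fun t => PySem.Str.endswith w t)).map (pvMd w))) := by
  induction ts with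
  | nil =>
    intro d dom hnd hc _
    simp [pvDedup, pvUpd_self d w hnd]
  | cons t ts ih =>
    intro d dom hnd hc hdom
    rw [List.foldl_cons]
    by_cases h2 : PySem.Str.endswith w t = true
    · have h2c : PySem.Chars.endswith w.toList t.toList = true := by
        rw [← PySem.Str.endswith_eq]; exact h2
      have hstep : pvAStep w (d, dom) t =
        (if (d.getD w []).contains (pvMd w t) then (d, some (pvMd w t))
         else (d.insert w (d.getD w [] ++ [pvMd w t]), some (pvMd w t))) := by
        unfold pvAStep pvMd
        by_cases h1 : PySem.Str.endswith w ("." ++ t) = true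
        · simp only [h1, if_pos]
          have hne : w ≠ "" := by
            have := pvMd_ne_empty w t
            unfold pvMd at this; rwa [if_pos h1] at this
          simp [hne, hc]
        · simp only [h1, h2, if_true]
          have hne : PySem.Str.slice w none (some (-(PySem.Str.len t))) ++ "." ++ t ≠ "" := by
            have := pvMd_ne_empty w t
            unfold pvMd at this; rwa [if_neg h1] at this
          simp [hc]
      rw [hstep]
      have hfil : (t :: ts).filter (fun t => PySem.Str.endswith w t)
          = t :: ts.filter (fun t => PySem.Str.endswith w t) := by
        simp [h2c]
      rw [hfil, List.map_cons]
      by_cases hm : pvMd w t ∈ d.getD w []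
      · rw [if_pos (by simpa using hm)]
        rw [ih d (some (pvMd w t)) hnd hc (by
          intro s hs; cases hs; exact ⟨pvMd_ne_empty w t, hm⟩)]
        congr 1
        rw [pvDedup_cons, if_pos (by simpa using hm : (d.getD w []).contains (pvMd w t) = true)]
      · rw [if_neg (by simpa using hm)]
        set d' := d.insert w (d.getD w [] ++ [pvMd w t]) with hd'
        have hnd' : d'.keys.Nodup := PySem.Dict.nodup_keys_insert d w _ hnd
        have hc' : d'.contains w = true := PySem.Dict.contains_insert_self d w _
        have hg' : d'.getD w [] = d.getD w [] ++ [pvMd w t] :=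
          PySem.Dict.getD_insert_self d w _ []
        rw [ih d' (some (pvMd w t)) hnd' hc' (by
          intro s hs; cases hs; exact ⟨pvMd_ne_empty w t, by rw [hg']; simp⟩)]
        rw [hg']
        have hit' : d'.items = pvUpd d.items w (d.getD w [] ++ [pvMd w t]) :=
          PySem.Dict.items_insert_of_contains d _ hc
        rw [hit', pvUpd_pvUpd]
        congr 1
        rw [pvDedup_cons, if_neg (by simpa using hm : ¬ (d.getD w []).contains (pvMd w t) = true)]
    · have h1 : ¬ PySem.Str.endswith w ("." ++ t) = true := by
        intro h1; exact h2 (pv_ew_dot w t h1)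
      have h2c : PySem.Chars.endswith w.toList t.toList = false := by
        rw [← PySem.Str.endswith_eq]; exact Bool.not_eq_true _ ▸ h2
      have h1c : PySem.Chars.endswith w.toList ("." ++ t).toList = false := by
        rw [← PySem.Str.endswith_eq]; exact Bool.not_eq_true _ ▸ h1
      have h1c' : PySem.Chars.endswith w.toList ('.' :: t.toList) = false := by
        simpa [String.toList_append] using h1c
      have hfil : (t :: ts).filter (fun t => PySem.Str.endswith w t)
          = ts.filter (fun t => PySem.Str.endswith w t) := by
        simp [h2c]
      rw [hfil]
      cases dom with
      | none =>
        have hstep : pvAStep w (d, none) t = (d, none) := by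
          unfold pvAStep
          simp [h1c', h2c]
        rw [hstep]
        exact ih d none hnd hc (by intro s hs; cases hs)
      | some s =>
        obtain ⟨hs0, hs1⟩ := hdom s rfl
        have hstep : pvAStep w (d, some s) t = (d, some s) := by
          unfold pvAStep
          simp [h1c', h2c, hs0, hc, hs1]
        rw [hstep]
        exact ih d (some s) hnd hc (by intro u hu; cases hu; exact ⟨hs0, hs1⟩)

-- ---- A-side: the outer loop over words ----
theorem pvA_outer (tlds : List String) (ws : List String) :
    ∀ (d : PySem.Dict String (List String)) (p : List String),
    d.items = p.map (fun w => (w, pvF tlds w)) → p.Nodup →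
    (ws.foldl (fun (mtchs : PySem.Dict String (List String)) word =>
        let mtchs := if mtchs.contains word then mtchs else mtchs.insert word []
        (tlds.foldl (pvAStep word) (mtchs, none)).1) d).items
      = (PySem.Set.update p ws).map (fun w => (w, pvF tlds w)) := by
  induction ws with
  | nil =>
    intro d p hitems hp
    have hupd : PySem.Set.update p [] = p := rfl
    rw [List.foldl_nil, hupd]
    exact hitems
  | cons w ws ih =>
    intro d p hitems hp
    have hkeys : d.keys = p := by
      have hk : d.keys = d.items.map (fun q => q.1) := rfl
      rw [hk, hitems, List.map_map]
      show List.map (fun w => w) p = p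
      exact List.map_id' p
    have hnd : d.keys.Nodup := hkeys ▸ hp
    rw [List.foldl_cons, PySem.Set.update_cons]
    by_cases hw : w ∈ p
    · have hc : d.contains w = true := by
        rw [PySem.Dict.contains_eq_decide_mem_keys, hkeys]; simpa using hw
      have hgd : d.getD w [] = pvF tlds w := by
        apply PySem.Dict.getD_of_mem_items d _ hnd
        rw [hitems]
        exact List.mem_map.mpr ⟨w, hw, rfl⟩
      show ((ws.foldl _ ((tlds.foldl (pvAStep w)
          (if d.contains w = true then d else d.insert w [], none)).1))).items = _
      rw [if_pos hc]
      have hin := pvA_inner w tlds d none hnd hc (by intro s hs; cases hs)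
      have habsorb : pvDedup (d.getD w [])
          ((tlds.filter (fun t => PySem.Str.endswith w t)).map (pvMd w)) = d.getD w [] := by
        apply pvDedup_eq_self
        intro x hx
        rw [hgd]
        exact (mem_pvDedup [] _ x).mpr (Or.inr hx)
      have hfix : (tlds.foldl (pvAStep w) (d, none)).1.items = d.items := by
        rw [hin, habsorb]
        exact pvUpd_self d w hnd
      have hdict : (tlds.foldl (pvAStep w) (d, none)).1 = d := by
        apply PySem.Dict.ext
        exact hfix
      rw [hdict, PySem.Set.add_of_mem hw]
      exact ih d p hitems hp
    · have hc : d.contains w = false := by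
        rw [PySem.Dict.contains_eq_decide_mem_keys, hkeys]; simpa using hw
      show ((ws.foldl _ ((tlds.foldl (pvAStep w)
          (if d.contains w = true then d else d.insert w [], none)).1))).items = _
      rw [hc]
      simp only [Bool.false_eq_true, if_false]
      set d' := d.insert w ([] : List String) with hd'
      have hit' : d'.items = d.items ++ [(w, [])] :=
        PySem.Dict.items_insert_of_not_contains d _ hc
      have hkeys' : d'.keys = p ++ [w] := by
        have hk : d'.keys = d'.items.map (fun q => q.1) := rfl
        rw [hk, hit', hitems]
        simp [List.map_map]
        show List.map (fun w => w) p = p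
        exact List.map_id' p
      have hnd' : d'.keys.Nodup := by
        rw [hkeys']
        simp [List.nodup_append, hp]
        intro a ha hae
        exact hw (hae ▸ ha)
      have hc' : d'.contains w = true := PySem.Dict.contains_insert_self d w []
      have hg' : d'.getD w [] = [] := PySem.Dict.getD_insert_self d w [] []
      have hin := pvA_inner w tlds d' none hnd' hc' (by intro s hs; cases hs)
      have hD1 : (tlds.foldl (pvAStep w) (d', none)).1.items
          = (p ++ [w]).map (fun w => (w, pvF tlds w)) := by
        rw [hin, hg']
        have hpvf : pvDedup []
            ((tlds.filter (fun t => PySem.Str.endswith w t)).map (pvMd w)) = pvF tlds w := rfl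
        have hnomem : ∀ q ∈ d.items, q.1 ≠ w := by
          intro q hq
          rw [hitems] at hq
          obtain ⟨w', hw', rfl⟩ := List.mem_map.mp hq
          intro hqe
          exact hw (by rw [← hqe]; exact hw')
        rw [hpvf, hit', pvUpd_append, pvUpd_of_not_mem d.items w _ hnomem,
          List.map_append, hitems]
        congr 1
        simp [pvUpd]
      rw [PySem.Set.add_of_not_mem hw]
      exact ih _ (p ++ [w]) hD1 (by
        simp [List.nodup_append, hp]
        intro a ha hae
        exact hw (hae ▸ ha))

-- ---- B-side ----
-- indices of the tlds equal to s, in order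
def pvJ (tlds : List String) (s : String) : List Int :=
  ((PySem.List.enumerate tlds 0).filter (fun p => p.2 == s)).map (·.1)

-- indices of the tlds that are suffixes of w, in order
def pvI (tlds : List String) (w : String) : List Int :=
  ((PySem.List.enumerate tlds 0).filter (fun p => PySem.Str.endswith w p.2)).map (·.1)

theorem pvBIndex_getD (tlds : List String) (s : String) :
    (pvBIndex tlds).getD s [] = pvJ tlds s := by
  unfold pvBIndex pvJ
  have h1 : (PySem.List.enumerate tlds 0).foldl
        (fun d p => d.modify p.2 [] (fun l => l ++ [p.1])) PySem.Dict.empty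
      = ((PySem.List.enumerate tlds 0).map Prod.swap).foldl
        (fun d q => d.modify q.1 [] (fun l => l ++ [q.2])) PySem.Dict.empty := by
    rw [List.foldl_map]
    rfl
  rw [h1, PySem.Dict.getD_foldl_modify_append]
  rw [List.filter_map, List.map_map]
  rfl

theorem pv_mem_pvJ (tlds : List String) (s : String) (i : Int) :
    i ∈ pvJ tlds s ↔ ∃ (k : Nat) (h : k < tlds.length), i = (k : Int) ∧ tlds[k] = s := by
  unfold pvJ
  simp only [List.mem_map, List.mem_filter, PySem.List.mem_enumerate_iff]
  constructor
  · rintro ⟨p, ⟨⟨k, hk, rfl⟩, hq⟩, rfl⟩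
    exact ⟨k, hk, by simp, by simpa using hq⟩
  · rintro ⟨k, hk, rfl, hks⟩
    exact ⟨((k : Int), tlds[k]), ⟨⟨k, hk, by simp⟩, by simpa using hks⟩, rfl⟩

theorem pv_mem_pvI (tlds : List String) (w : String) (i : Int) :
    i ∈ pvI tlds w ↔ ∃ (k : Nat) (h : k < tlds.length),
      i = (k : Int) ∧ PySem.Str.endswith w tlds[k] = true := by
  unfold pvI
  simp only [List.mem_map, List.mem_filter, PySem.List.mem_enumerate_iff]
  constructor
  · rintro ⟨p, ⟨⟨k, hk, rfl⟩, hq⟩, rfl⟩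
    exact ⟨k, hk, by simp, by simpa using hq⟩
  · rintro ⟨k, hk, rfl, hks⟩
    exact ⟨((k : Int), tlds[k]), ⟨⟨k, hk, by simp⟩, by simpa using hks⟩, rfl⟩

-- a string is a suffix of w iff it is one of the slices w[k:], 0 ≤ k ≤ len(w)
theorem pv_ew_iff_slice (w t : String) :
    PySem.Str.endswith w t = true
      ↔ ∃ k : Int, 0 ≤ k ∧ k < PySem.Str.len w + 1 ∧ PySem.Str.slice w (some k) none = t := by
  rw [PySem.Str.endswith_eq, PySem.Chars.endswith_iff]
  constructor
  · intro h
    have hle : t.toList.length ≤ w.toList.length := h.length_le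
    refine ⟨((w.toList.length - t.toList.length : Nat) : Int), by positivity, ?_, ?_⟩
    · have : PySem.Str.len w = (w.toList.length : Int) := by simp
      rw [this]
      omega
    · rw [← String.toList_inj, PySem.Str.toList_slice, PySem.Chars.slice_eq_listSlice,
        PySem.List.slice_from _ (by positivity)]
      simp only [Int.toNat_natCast]
      exact (List.suffix_iff_eq_drop.mp h).symm
  · rintro ⟨k, hk0, hkn, rfl⟩
    rw [PySem.Str.toList_slice, PySem.Chars.slice_eq_listSlice,
      PySem.List.slice_from _ hk0]
    exact List.drop_suffix _ _

theorem pvI_pairwise (tlds : List String) (w : String) :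
    (pvI tlds w).Pairwise (· < ·) := by
  unfold pvI
  rw [List.pairwise_map]
  exact (PySem.List.pairwise_lt_enumerate tlds 0).sublist List.filter_sublist

theorem pvJ_pairwise (tlds : List String) (s : String) :
    (pvJ tlds s).Pairwise (· < ·) := by
  unfold pvJ
  rw [List.pairwise_map]
  exact (PySem.List.pairwise_lt_enumerate tlds 0).sublist List.filter_sublist

theorem pv_hits (tlds : List String) (w : String) :
    PySem.List.sorted ((PySem.List.pyRange 0 (PySem.Str.len w + 1) 1).flatMap
        (fun k => pvJ tlds (PySem.Str.slice w (some k) none))) (fun i => i) false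
      = pvI tlds w := by
  apply PySem.List.sorted_eq_of_perm_of_pairwise_lt
  · have hnI : (pvI tlds w).Nodup :=
      (pvI_pairwise tlds w).imp (fun h => ne_of_lt h)
    have hnH : ((PySem.List.pyRange 0 (PySem.Str.len w + 1) 1).flatMap
        (fun k => pvJ tlds (PySem.Str.slice w (some k) none))).Nodup := by
      rw [List.nodup_flatMap]
      constructor
      · intro k _
        exact (pvJ_pairwise tlds _).imp (fun h => ne_of_lt h)
      · have hpw := PySem.List.pairwise_lt_pyRange_one 0 (PySem.Str.len w + 1)
        apply List.Pairwise.imp_of_mem ?_ hpw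
        intro a b ha hb hab i hia hib
        rw [pv_mem_pvJ] at hia hib
        obtain ⟨k, hk, rfl, hks⟩ := hia
        obtain ⟨k', hk', hkk', hks'⟩ := hib
        have : k = k' := by exact_mod_cast hkk'
        subst this
        rw [hks] at hks'
        have hlen := congrArg (fun s => s.toList.length) hks'
        have h0a : (0:Int) ≤ a := (PySem.List.mem_pyRange_one.mp ha).1
        have hbn : b < PySem.Str.len w + 1 := (PySem.List.mem_pyRange_one.mp hb).2
        have hlw : PySem.Str.len w = (w.toList.length : Int) := by simp
        simp only [PySem.Str.toList_slice, PySem.Chars.slice_eq_listSlice,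
          PySem.List.slice_from _ h0a, PySem.List.slice_from _ (le_of_lt (lt_of_le_of_lt h0a hab)),
          List.length_drop] at hlen
        omega
    rw [List.perm_ext_iff_of_nodup hnI hnH]
    intro i
    rw [pv_mem_pvI, List.mem_flatMap]
    constructor
    · rintro ⟨k, hk, rfl, hew⟩
      obtain ⟨j, hj0, hjn, hsl⟩ := (pv_ew_iff_slice w tlds[k]).mp hew
      exact ⟨j, PySem.List.mem_pyRange_one.mpr ⟨hj0, hjn⟩,
        (pv_mem_pvJ tlds _ _).mpr ⟨k, hk, rfl, hsl.symm⟩⟩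
    · rintro ⟨j, hj, hij⟩
      obtain ⟨hj0, hjn⟩ := PySem.List.mem_pyRange_one.mp hj
      obtain ⟨k, hk, rfl, hks⟩ := (pv_mem_pvJ tlds _ _).mp hij
      exact ⟨k, hk, rfl, (pv_ew_iff_slice w tlds[k]).mpr ⟨j, hj0, hjn, hks.symm⟩⟩
  · exact pvI_pairwise tlds w

theorem pvBWord_eq (tlds : List String) (w : String) :
    pvBWord tlds (pvBIndex tlds) w = pvF tlds w := by
  have hred : pvBWord tlds (pvBIndex tlds) w =
      (PySem.List.sorted ((PySem.List.pyRange 0 (PySem.Str.len w + 1) 1).foldl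
          (fun hits k => hits ++ (pvBIndex tlds).getD (PySem.Str.slice w (some k) none) []) [])
        (fun i => i) false).foldl
        (fun domains i =>
          let tld := PySem.List.pyGetD tlds i ""
          let domain := if PySem.Str.endswith w ("." ++ tld) then w
            else PySem.Str.slice w none (some (-(PySem.Str.len tld))) ++ "." ++ tld
          if domains.contains domain then domains else domains ++ [domain]) [] := rfl
  rw [hred]
  have h0 : (PySem.List.pyRange 0 (PySem.Str.len w + 1) 1).foldl
      (fun hits k => hits ++ (pvBIndex tlds).getD (PySem.Str.slice w (some k) none) []) []
    = (PySem.List.pyRange 0 (PySem.Str.len w + 1) 1).flatMap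
      (fun k => pvJ tlds (PySem.Str.slice w (some k) none)) := by
    rw [PySem.List.foldl_append_eq_flatMap
      (fun k => (pvBIndex tlds).getD (PySem.Str.slice w (some k) none) [])
      (PySem.List.pyRange 0 (PySem.Str.len w + 1) 1) []]
    rw [List.nil_append]
    congr 1
    funext k
    exact pvBIndex_getD tlds _
  have h1 : ∀ (l : List Int) (acc : List String),
      l.foldl (fun domains i =>
        let tld := PySem.List.pyGetD tlds i ""
        let domain := if PySem.Str.endswith w ("." ++ tld) then w
          else PySem.Str.slice w none (some (-(PySem.Str.len tld))) ++ "." ++ tld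
        if domains.contains domain then domains else domains ++ [domain]) acc
      = pvDedup acc (l.map (fun i => pvMd w (PySem.List.pyGetD tlds i ""))) := by
    intro l acc
    unfold pvDedup
    rw [List.foldl_map]
    rfl
  rw [h0, pv_hits, h1]
  unfold pvF
  congr 1
  unfold pvI
  rw [List.map_map]
  have h2 : ((PySem.List.enumerate tlds 0).filter
        (fun p => PySem.Str.endswith w p.2)).map
        ((fun i => pvMd w (PySem.List.pyGetD tlds i "")) ∘ (·.1))
      = ((PySem.List.enumerate tlds 0).filter
        (fun p => PySem.Str.endswith w p.2)).map (fun p => pvMd w p.2) := by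
    apply List.map_congr_left
    intro p hp
    have hp' := List.mem_of_mem_filter hp
    obtain ⟨k, hk, rfl⟩ := (PySem.List.mem_enumerate_iff tlds 0 p).mp hp'
    have : PySem.List.pyGetD tlds ((0 : Int) + (k : Int)) "" = tlds[k] := by
      rw [PySem.List.pyGetD_eq_getElem tlds "" (by positivity) (by exact_mod_cast by omega)]
      congr 1
      omega
    simp only [Function.comp]
    rw [this]
  rw [h2]
  conv_rhs => rw [← PySem.List.map_snd_enumerate tlds 0, List.filter_map, List.map_map]
  rfl

theorem pvB_outer (tlds : List String) (by_tld : PySem.Dict String (List Int)) (ws : List String) :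
    ∀ (d : PySem.Dict String (List String)) (p : List String),
    d.items = p.map (fun w => (w, pvBWord tlds by_tld w)) → p.Nodup →
    (ws.foldl (fun (result : PySem.Dict String (List String)) word =>
        if result.contains word then result
        else result.insert word (pvBWord tlds by_tld word)) d).items
      = (PySem.Set.update p ws).map (fun w => (w, pvBWord tlds by_tld w)) := by
  induction ws with
  | nil =>
    intro d p hitems _
    have hupd : PySem.Set.update p [] = p := rfl
    rw [List.foldl_nil, hupd]
    exact hitems
  | cons w ws ih =>
    intro d p hitems hp
    have hkeys : d.keys = p := by
      have hk : d.keys = d.items.map (fun q => q.1) := rfl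
      rw [hk, hitems, List.map_map]
      show List.map (fun w => w) p = p
      exact List.map_id' p
    rw [List.foldl_cons, PySem.Set.update_cons]
    by_cases hw : w ∈ p
    · have hc : d.contains w = true := by
        rw [PySem.Dict.contains_eq_decide_mem_keys, hkeys]; simpa using hw
      rw [if_pos hc, PySem.Set.add_of_mem hw]
      exact ih d p hitems hp
    · have hc : d.contains w = false := by
        rw [PySem.Dict.contains_eq_decide_mem_keys, hkeys]; simpa using hw
      rw [hc]
      simp only [Bool.false_eq_true, if_false]
      have hit' : (d.insert w (pvBWord tlds by_tld w)).items
          = d.items ++ [(w, pvBWord tlds by_tld w)] :=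
        PySem.Dict.items_insert_of_not_contains d _ hc
      rw [PySem.Set.add_of_not_mem hw]
      apply ih
      · rw [hit', hitems, List.map_append]
        rfl
      · simp [List.nodup_append, hp]
        intro a ha hae
        exact hw (hae ▸ ha)

theorem pvA_char (words tlds : List String) :
    find_matching_tlds words tlds
      = (PySem.Set.ofList words).map (fun w => (w, pvF tlds w)) := by
  unfold find_matching_tlds
  have h := pvA_outer tlds words PySem.Dict.empty [] rfl List.nodup_nil
  rw [PySem.Set.update_nil_left] at h
  exact h

theorem pvB_char (words tlds : List String) :
    find_matching_tlds_alt words tlds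
      = (PySem.Set.ofList words).map (fun w => (w, pvBWord tlds (pvBIndex tlds) w)) := by
  have hred : find_matching_tlds_alt words tlds
      = (words.foldl (fun (result : PySem.Dict String (List String)) word =>
          if result.contains word then result
          else result.insert word (pvBWord tlds (pvBIndex tlds) word)) PySem.Dict.empty).items := rfl
  rw [hred]
  have h := pvB_outer tlds (pvBIndex tlds) words PySem.Dict.empty [] rfl List.nodup_nil
  rw [PySem.Set.update_nil_left] at h
  exact h

-- ===== VERDICT (by name: the statement is the Claim_ definition above) =====
theorem find_matching_tlds_spec : Claim_equal_find_matching_tlds := by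
  intro words tlds _
  unfold Spec_find_matching_tlds
  rw [pvA_char, pvB_char]
  apply List.map_congr_left
  intro w _
  rw [pvBWord_eq]
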